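-- pv_equiv track=rewrite | github.com/villn800/BRAIN | backend/app/services/url_extractors.py | _pick_best_image
-- ===== SOURCE A (Python) =====
-- from typing import Iterable, List, Tuple
--
-- def _is_avatar(url: str) -> bool:
--     lowered = url.lower()
--     return "/profile_images/" in lowered or "default_profile" in lowered
--
-- def _has_media_hint(url: str) -> bool:
--     lowered = url.lower()
--     return (
--         "/media/" in lowered
--         or "card_img" in lowered
--         or "twimg.com/media" in lowered
--     )
--
-- def _pick_best_image(candidates: List[str]) -> str | None:
--     if not candidates:
--         return None
--     media_candidates = [url for url in candidates if _has_media_hint(url) and not _is_avatar(url)]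
--     if media_candidates:
--         return media_candidates[0]
--     non_avatar = [url for url in candidates if not _is_avatar(url)]
--     if non_avatar:
--         return non_avatar[0]
--     return candidates[0]
-- ===== SOURCE B (Python) =====
-- # B: single pass maintaining first-media and first-non-avatar slots instead of two filtering passes.
--
-- def _is_avatar(url: str) -> bool:
--     lowered = url.lower()
--     return "/profile_images/" in lowered or "default_profile" in lowered
--
-- def _has_media_hint(url: str) -> bool:
--     lowered = url.lower()
--     return (
--         "/media/" in lowered
--         or "card_img" in lowered
--         or "twimg.com/media" in lowered
--     )
--
-- def _pick_best_image(candidates):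
--     if not candidates:
--         return None
--     first_media = None
--     first_non_avatar = None
--     for url in candidates:
--         avatar = _is_avatar(url)
--         if not avatar:
--             if first_media is None and _has_media_hint(url):
--                 first_media = url
--             if first_non_avatar is None:
--                 first_non_avatar = url
--     if first_media is not None:
--         return first_media
--     if first_non_avatar is not None:
--         return first_non_avatar
--     return candidates[0]
-- ===== Notes on version B (the rewrite author's own statement) =====
-- stated objective: alternative
-- what changed: Replaced the two list-comprehension filtering passes and fallback chain with a single loop over candidates that maintains two set-once slots (first media non-avatar url, first non-avatar url).
import Mathlib
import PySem

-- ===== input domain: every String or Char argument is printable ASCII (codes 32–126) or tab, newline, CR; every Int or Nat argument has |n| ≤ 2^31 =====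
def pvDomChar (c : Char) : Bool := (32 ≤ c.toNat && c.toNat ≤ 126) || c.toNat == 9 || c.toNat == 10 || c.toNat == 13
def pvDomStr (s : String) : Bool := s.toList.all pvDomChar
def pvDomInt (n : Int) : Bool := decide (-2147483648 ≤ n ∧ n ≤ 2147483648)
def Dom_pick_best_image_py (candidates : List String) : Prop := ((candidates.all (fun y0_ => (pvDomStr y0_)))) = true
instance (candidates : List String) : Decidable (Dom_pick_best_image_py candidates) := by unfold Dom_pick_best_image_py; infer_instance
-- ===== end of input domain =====

-- B replaces A's two filtering passes by a single loop keeping two set-once slots; same selection order.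

-- ===== PORT A =====
def is_avatar_py (url : String) : Bool :=
  let lowered := PySem.Str.lower url
  PySem.Str.isIn "/profile_images/" lowered || PySem.Str.isIn "default_profile" lowered

def has_media_hint_py (url : String) : Bool :=
  let lowered := PySem.Str.lower url
  PySem.Str.isIn "/media/" lowered || PySem.Str.isIn "card_img" lowered ||
    PySem.Str.isIn "twimg.com/media" lowered

def pick_best_image_py (candidates : List String) : Option String :=
  match candidates with
  | [] => none
  | c :: _ =>
    let media_candidates := candidates.filter (fun url => has_media_hint_py url && !is_avatar_py url)
    match media_candidates with
    | m :: _ => some m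
    | [] =>
      let non_avatar := candidates.filter (fun url => !is_avatar_py url)
      match non_avatar with
      | n :: _ => some n
      | [] => some c

-- ===== PORT B =====
-- single pass: fold over candidates maintaining (first_media, first_non_avatar)
def pick_slots (candidates : List String) : Option String × Option String :=
  candidates.foldl
    (fun (st : Option String × Option String) url =>
      if is_avatar_py url then st
      else
        (match st.1 with
         | none => if has_media_hint_py url then some url else none
         | some m => some m,
         match st.2 with
         | none => some url
         | some n => some n))
    (none, none)

def pick_best_image_py_alt (candidates : List String) : Option String :=
  match candidates with
  | [] => none
  | c :: _ =>
    match pick_slots candidates with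
    | (some m, _) => some m
    | (none, some n) => some n
    | (none, none) => some c

-- ===== PRECONDITION & SPEC =====
def Spec_pick_best_image_py (candidates : List String) (out : Option String) : Prop := out = pick_best_image_py_alt candidates
instance (candidates : List String) (out : Option String) : Decidable (Spec_pick_best_image_py candidates out) := by unfold Spec_pick_best_image_py; infer_instance

-- ===== CLAIM (what is proved, stated in full; the proofs are below) =====
def Claim_equal_pick_best_image_py : Prop := ∀ (candidates : List String), Dom_pick_best_image_py candidates → Spec_pick_best_image_py candidates (pick_best_image_py candidates)

-- ===== LEMMAS AND PROOFS =====

-- invariant: the fold fills each slot with its filter's first element unless already set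
theorem pick_slots_invariant (l : List String) (fm fna : Option String) :
    l.foldl
      (fun (st : Option String × Option String) url =>
        if is_avatar_py url then st
        else
          (match st.1 with
           | none => if has_media_hint_py url then some url else none
           | some m => some m,
           match st.2 with
           | none => some url
           | some n => some n))
      (fm, fna)
    = (fm.or (l.filter (fun u => has_media_hint_py u && !is_avatar_py u)).head?,
       fna.or (l.filter (fun u => !is_avatar_py u)).head?) := by
  induction l generalizing fm fna with
  | nil => simp
  | cons u l ih =>
    simp only [List.foldl_cons, List.filter_cons]
    by_cases ha : is_avatar_py u
    · simp [ha, ih]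
    · simp only [ha, Bool.not_false, Bool.and_true]
      rw [ih]
      cases fm <;> cases fna <;> by_cases hm : has_media_hint_py u <;> simp [hm]

theorem pick_slots_eq (l : List String) :
    pick_slots l
    = ((l.filter (fun u => has_media_hint_py u && !is_avatar_py u)).head?,
       (l.filter (fun u => !is_avatar_py u)).head?) := by
  simpa [pick_slots] using pick_slots_invariant l none none

-- ===== VERDICT (by name: the statement is the Claim_ definition above) =====
theorem pick_best_image_py_spec : Claim_equal_pick_best_image_py := by
  intro candidates _
  unfold Spec_pick_best_image_py pick_best_image_py pick_best_image_py_alt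
  cases candidates with
  | nil => rfl
  | cons c cs =>
    rw [pick_slots_eq]
    cases hm : ((c :: cs).filter (fun u => has_media_hint_py u && !is_avatar_py u)) with
    | cons m _ => simp
    | nil =>
      cases hn : ((c :: cs).filter (fun u => !is_avatar_py u)) with
      | cons n _ => simp [hn]
      | nil => simp [hn]
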